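-- pv_equiv track=rewrite | github.com/afanty2021/Memento-Skills | core/context/history/manager.py | _split_by_rounds
-- ===== SOURCE A (Python) =====
-- from typing import Any, Callable, Coroutine
--
-- def _split_by_rounds(
--     messages: list[dict[str, Any]], keep_rounds: int
-- ) -> tuple[list[dict[str, Any]], list[dict[str, Any]]]:
--     """将消息按对话轮次分割为 (recent, earlier)。"""
--     if not messages or keep_rounds <= 0:
--         return messages, []
--
--     round_boundaries: list[int] = []
--     for i, msg in enumerate(messages):
--         if msg.get("role") == "user":
--             round_boundaries.append(i)
--
--     if not round_boundaries or len(round_boundaries) <= keep_rounds: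
--         return messages, []
--
--     split_idx = round_boundaries[-keep_rounds]
--     return messages[split_idx:], messages[:split_idx]
-- ===== SOURCE B (Python) =====
-- def _split_by_rounds(messages, keep_rounds):
--     """Split (recent, earlier) by a single backward scan, no boundary list."""
--     if not messages or keep_rounds <= 0:
--         return messages, []
--     count = 0
--     candidate = None
--     for i, msg in reversed(list(enumerate(messages))):
--         if msg.get("role") == "user":
--             if candidate is not None:
--                 return messages[candidate:], messages[:candidate]
--             count += 1
--             if count == keep_rounds:
--                 candidate = i
--     return messages, []
-- ===== Notes on version B (the rewrite author's own statement) =====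
-- stated objective: alternative
-- what changed: Replaces the forward pass that materialises the full list of user-message indices (then negative-indexes and slices) by a single backward scan keeping only an integer count and one candidate split index, stopping as soon as one extra user message proves the split is needed.
import Mathlib
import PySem

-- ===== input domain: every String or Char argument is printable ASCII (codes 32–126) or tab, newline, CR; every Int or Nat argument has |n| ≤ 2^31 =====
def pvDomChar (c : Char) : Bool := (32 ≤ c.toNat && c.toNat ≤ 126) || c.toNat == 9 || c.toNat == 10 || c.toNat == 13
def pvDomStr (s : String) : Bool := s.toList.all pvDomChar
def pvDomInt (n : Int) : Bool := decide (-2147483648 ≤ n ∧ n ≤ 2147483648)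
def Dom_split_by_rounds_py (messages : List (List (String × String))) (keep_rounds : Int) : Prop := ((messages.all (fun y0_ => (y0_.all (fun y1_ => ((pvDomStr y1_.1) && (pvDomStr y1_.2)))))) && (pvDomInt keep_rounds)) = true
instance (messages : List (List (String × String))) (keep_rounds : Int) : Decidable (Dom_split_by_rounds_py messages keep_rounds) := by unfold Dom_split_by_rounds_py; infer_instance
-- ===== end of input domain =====

-- B replaces A's forward pass that builds the full list of user-message indices by a
-- single backward scan keeping only a count and one candidate split index (objective: alternative).

-- msg.get("role") == "user"  (first-match lookup, shared by both Pythons verbatim)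
def pvIsUser (msg : List (String × String)) : Bool :=
  (PySem.Dict.mk msg).get? "role" == some "user"

-- ===== PORT A =====
def split_by_rounds_py (messages : List (List (String × String))) (keep_rounds : Int) : (List (List (String × String))) × (List (List (String × String))) :=
  if messages = [] ∨ keep_rounds ≤ 0 then (messages, [])
  else
    let round_boundaries : List Int :=
      (PySem.List.enumerate messages).foldl
        (fun acc p => if pvIsUser p.2 then acc ++ [p.1] else acc) []
    if round_boundaries = [] ∨ (round_boundaries.length : Int) ≤ keep_rounds then (messages, [])
    else
      match PySem.List.pyGet? round_boundaries (-keep_rounds) with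
      | some split_idx =>
          (PySem.List.slice messages (some split_idx) none,
           PySem.List.slice messages none (some split_idx))
      | none => (messages, [])  -- unreachable: here 0 < keep_rounds < len(round_boundaries)

-- ===== PORT B =====
-- the backward for-loop of Source B (over reversed(list(enumerate(messages)))), with its early return
def pvAltLoop (messages : List (List (String × String))) (keep_rounds : Int) :
    List (Int × List (String × String)) → Int → Option Int →
    (List (List (String × String))) × (List (List (String × String)))
  | [], _, _ => (messages, [])
  | (i, msg) :: rest, count, candidate =>
    if pvIsUser msg then
      match candidate with
      | some c =>
          (PySem.List.slice messages (some c) none,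
           PySem.List.slice messages none (some c))
      | none =>
          pvAltLoop messages keep_rounds rest (count + 1)
            (if count + 1 = keep_rounds then some i else none)
    else pvAltLoop messages keep_rounds rest count candidate

def split_by_rounds_py_alt (messages : List (List (String × String))) (keep_rounds : Int) : (List (List (String × String))) × (List (List (String × String))) :=
  if messages = [] ∨ keep_rounds ≤ 0 then (messages, [])
  else pvAltLoop messages keep_rounds (PySem.List.enumerate messages).reverse 0 none

-- ===== PRECONDITION & SPEC =====
def Spec_split_by_rounds_py (messages : List (List (String × String))) (keep_rounds : Int) (out : (List (List (String × String))) × (List (List (String × String)))) : Prop := out = split_by_rounds_py_alt messages keep_rounds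
instance (messages : List (List (String × String))) (keep_rounds : Int) (out : (List (List (String × String))) × (List (List (String × String)))) : Decidable (Spec_split_by_rounds_py messages keep_rounds out) := by unfold Spec_split_by_rounds_py; infer_instance

-- ===== CLAIM (what is proved, stated in full; the proofs are below) =====
def Claim_equal_split_by_rounds_py : Prop := ∀ (messages : List (List (String × String))) (keep_rounds : Int), Dom_split_by_rounds_py messages keep_rounds → Spec_split_by_rounds_py messages keep_rounds (split_by_rounds_py messages keep_rounds)

-- ===== LEMMAS AND PROOFS =====

-- proof-only helpers: the split pair, and its option-valued variant matching both match-expressions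
def pvSplit (m : List (List (String × String))) (c : Int) :
    (List (List (String × String))) × (List (List (String × String))) :=
  (PySem.List.slice m (some c) none, PySem.List.slice m none (some c))

def pvSplitO (m : List (List (String × String))) : Option Int →
    (List (List (String × String))) × (List (List (String × String)))
  | some c => pvSplit m c
  | none => (m, [])

theorem altLoop_step_user (m : List (List (String × String))) (k i count : Int)
    (msg : List (String × String)) (rest : List (Int × List (String × String)))
    (h : pvIsUser msg) :
    pvAltLoop m k ((i, msg) :: rest) count none =
      pvAltLoop m k rest (count + 1) (if count + 1 = k then some i else none) := by
  simp [pvAltLoop, h]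

theorem altLoop_step_skip (m : List (List (String × String))) (k i count : Int)
    (msg : List (String × String)) (rest : List (Int × List (String × String)))
    (cand : Option Int) (h : ¬ pvIsUser msg) :
    pvAltLoop m k ((i, msg) :: rest) count cand = pvAltLoop m k rest count cand := by
  simp [pvAltLoop, h]

theorem altLoop_some (m : List (List (String × String))) (k c : Int) :
    ∀ (l : List (Int × List (String × String))) (count : Int),
      pvAltLoop m k l count (some c) =
        if l.filter (fun p => pvIsUser p.2) = [] then (m, []) else pvSplit m c := by
  intro l
  induction l with
  | nil => intro count; simp [pvAltLoop]
  | cons p rest ih =>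
    intro count
    obtain ⟨i, msg⟩ := p
    by_cases h : pvIsUser msg
    · simp [pvAltLoop, h, pvSplit]
    · rw [altLoop_step_skip m k i count msg rest _ h, ih]
      rw [List.filter_cons_of_neg (by simpa using h)]

theorem altLoop_none (m : List (List (String × String))) (k : Int) :
    ∀ (l : List (Int × List (String × String))) (count : Int), count < k →
      pvAltLoop m k l count none =
        (if (((l.filter (fun p => pvIsUser p.2)).map (·.1)).length : Int) ≤ k - count then (m, [])
         else pvSplitO m (((l.filter (fun p => pvIsUser p.2)).map (·.1))[(k - count).toNat - 1]?)) := by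
  intro l
  induction l with
  | nil => intro count hc; simp [pvAltLoop]; omega
  | cons p rest ih =>
    intro count hc
    obtain ⟨i, msg⟩ := p
    by_cases h : pvIsUser msg
    · rw [altLoop_step_user m k i count msg rest h]
      by_cases hk : count + 1 = k
      · rw [if_pos hk, altLoop_some]
        have hkc : (k - count).toNat - 1 = 0 := by omega
        simp only [List.filter_cons, h, if_pos, List.map_cons, hkc, List.getElem?_cons_zero,
          List.length_cons]
        by_cases he : rest.filter (fun p => pvIsUser p.2) = []
        · rw [if_pos he, if_pos (by simp [he]; omega)]
        · rw [if_neg he, if_neg ?_]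
          · rfl
          · have : 1 ≤ (rest.filter (fun p => pvIsUser p.2)).length :=
              List.length_pos_iff.mpr he
            simp only [List.length_map]
            omega
      · rw [if_neg hk, ih (count + 1) (by omega)]
        simp only [List.filter_cons, h, if_pos, List.map_cons, List.length_cons]
        by_cases hle : (((rest.filter (fun p => pvIsUser p.2)).map (·.1)).length : Int) ≤ k - (count + 1)
        · rw [if_pos hle, if_pos (by push_cast at *; omega)]
        · rw [if_neg hle, if_neg (by push_cast at *; omega)]
          have hstep : (k - count).toNat - 1 = ((k - (count + 1)).toNat - 1) + 1 := by omega
          rw [hstep, List.getElem?_cons_succ]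
    · rw [altLoop_step_skip m k i count msg rest _ h, ih count hc]
      rw [List.filter_cons_of_neg (by simpa using h)]

theorem split_eq (messages : List (List (String × String))) (keep_rounds : Int) :
    split_by_rounds_py messages keep_rounds = split_by_rounds_py_alt messages keep_rounds := by
  unfold split_by_rounds_py split_by_rounds_py_alt
  by_cases h0 : messages = [] ∨ keep_rounds ≤ 0
  · rw [if_pos h0, if_pos h0]
  · rw [if_neg h0, if_neg h0]
    have hk : 0 < keep_rounds := by omega
    rw [altLoop_none messages keep_rounds _ 0 hk]
    rw [PySem.List.foldl_append_if]
    set es := PySem.List.enumerate messages with hes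
    set bs := (es.filter (fun p => pvIsUser p.2)).map (·.1) with hbs
    have hrev : ((es.reverse.filter (fun p => pvIsUser p.2)).map (·.1)) = bs.reverse := by
      rw [List.filter_reverse, List.map_reverse]
    rw [hrev]
    simp only [List.nil_append, List.length_reverse, Int.sub_zero]
    by_cases hle : (bs.length : Int) ≤ keep_rounds
    · rw [if_pos (Or.inr hle), if_pos hle]
    · rw [if_neg ?_, if_neg hle]
      · have hlen : keep_rounds.toNat < bs.length := by omega
        have h1 : PySem.List.pyGet? bs (-keep_rounds) = bs[bs.length - keep_rounds.toNat]? := by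
          have hn : -keep_rounds = -((keep_rounds.toNat : Nat) : Int) := by omega
          rw [hn]
          exact PySem.List.pyGet?_neg_natCast bs keep_rounds.toNat (by omega) (le_of_lt hlen)
        have h2 : bs.reverse[keep_rounds.toNat - 1]? = bs[bs.length - keep_rounds.toNat]? := by
          rw [List.getElem?_reverse (by omega)]
          congr 1
          omega
        rw [h1, h2]
        cases bs[bs.length - keep_rounds.toNat]? with
        | none => simp [pvSplitO]
        | some c => simp [pvSplitO, pvSplit]
      · rintro (hh | hh)
        · simp [hh] at hle; omega
        · exact hle hh

-- ===== VERDICT (by name: the statement is the Claim_ definition above) =====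
theorem split_by_rounds_py_spec : Claim_equal_split_by_rounds_py := by
  intro messages keep_rounds _
  unfold Spec_split_by_rounds_py
  exact split_eq messages keep_rounds
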